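-- pv_equiv track=rewrite | github.com/MichalKalmucki/Computer-Vision | board_game_detection/main.py | denoise_detections
-- ===== SOURCE A (Python) =====
-- def denoise_detections(sequence):
--     highest_numbers = []
--     current_number = None
--     consecutive_count = 0
--     highest_number = None
--
--     for number in sequence:
--         if number == current_number:
--             consecutive_count += 1
--         else:
--             consecutive_count = 1
--             current_number = number
--
--         if consecutive_count >= 2:
--             if highest_number is None or current_number > highest_number:
--                 highest_number = current_number
--         highest_numbers.append(highest_number)
--
--     return highest_numbers
-- ===== SOURCE B (Python) =====
-- def denoise_detections(sequence):
--     # Two-pass decomposition: mark each element that repeats its predecessor,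
--     # then take the running maximum of the marks (None = no mark yet).
--     marks = [None] + [y if y == x else None for x, y in zip(sequence, sequence[1:])] if sequence else []
--     out = []
--     best = None
--     for m in marks:
--         if m is not None:
--             best = m if best is None else max(best, m)
--         out.append(best)
--     return out
-- ===== Notes on version B (the rewrite author's own statement) =====
-- stated objective: simpler
-- what changed: Replaces A's single loop with run-counting state (current_number/consecutive_count/highest_number) by a two-pass decomposition: first mark each element that equals its predecessor via zip(sequence, sequence[1:]), then take the running maximum of the marks.
import Mathlib
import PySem

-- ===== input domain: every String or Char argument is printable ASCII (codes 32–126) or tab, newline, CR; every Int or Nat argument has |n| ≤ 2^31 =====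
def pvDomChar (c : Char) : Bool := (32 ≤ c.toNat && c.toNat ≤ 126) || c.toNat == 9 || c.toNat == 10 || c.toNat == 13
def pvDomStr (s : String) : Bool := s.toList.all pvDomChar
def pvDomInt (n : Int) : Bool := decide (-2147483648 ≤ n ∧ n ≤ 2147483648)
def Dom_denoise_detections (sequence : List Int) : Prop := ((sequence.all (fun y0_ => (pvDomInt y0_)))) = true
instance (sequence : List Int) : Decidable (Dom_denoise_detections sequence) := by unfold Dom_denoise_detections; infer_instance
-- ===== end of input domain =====

-- B replaces A's single stateful run-counting loop by a two-pass decomposition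
-- (mark predecessor-repeats, then running maximum); objective: simpler.

-- ===== PORT A =====
-- literal transliteration of A's loop: state = (current_number, consecutive_count, highest_number)
def pvLoopA (seq : List Int) (current : Option Int) (count : Int) (highest : Option Int) :
    List (Option Int) :=
  match seq with
  | [] => []
  | number :: rest =>
    let count' := if current = some number then count + 1 else 1
    let current' := if current = some number then current else some number
    let highest' :=
      if 2 ≤ count' then
        match highest with
        | none => some number          -- current_number = number here
        | some h => if h < number then some number else some h
      else highest
    highest' :: pvLoopA rest current' count' highest'

def denoise_detections (sequence : List Int) : List (Option Int) :=
  pvLoopA sequence none 0 none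

-- ===== PORT B =====
-- loop of Source B: running maximum over the marks list
def pvLoopB (marks : List (Option Int)) (best : Option Int) : List (Option Int) :=
  match marks with
  | [] => []
  | m :: rest =>
    let best' :=
      match m with
      | none => best
      | some v => match best with
                  | none => some v
                  | some w => some (max w v)
    best' :: pvLoopB rest best'

def denoise_detections_alt (sequence : List Int) : List (Option Int) :=
  let marks :=
    match sequence with
    | [] => []
    | _ :: _ =>
      none :: (sequence.zip (sequence.drop 1)).map
        (fun p => if p.2 = p.1 then some p.2 else none)
  pvLoopB marks none

-- ===== PRECONDITION & SPEC =====
def Spec_denoise_detections (sequence : List Int) (out : List (Option Int)) : Prop := out = denoise_detections_alt sequence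
instance (sequence : List Int) (out : List (Option Int)) : Decidable (Spec_denoise_detections sequence out) := by unfold Spec_denoise_detections; infer_instance

-- ===== CLAIM (what is proved, stated in full; the proofs are below) =====
def Claim_equal_denoise_detections : Prop := ∀ (sequence : List Int), Dom_denoise_detections sequence → Spec_denoise_detections sequence (denoise_detections sequence)

-- ===== LEMMAS AND PROOFS =====

-- After the first element, A's loop (with prev element p, run count c ≥ 1, best-so-far b)
-- computes exactly B's marks-then-running-max loop over the remaining consecutive pairs.
theorem pvLoopB_eq_pvLoopA (rest : List Int) :
    ∀ (p : Int) (b : Option Int) (c : Int), 1 ≤ c →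
      pvLoopB (((p :: rest).zip rest).map
          (fun q => if q.2 = q.1 then some q.2 else none)) b
        = pvLoopA rest (some p) c b := by
  induction rest with
  | nil => intro p b c hc; rfl
  | cons y rest' ih =>
    intro p b c hc
    by_cases hpy : y = p
    · subst hpy
      simp only [List.zip_cons_cons, List.map_cons, pvLoopB, pvLoopA, if_true]
      have h2' : 2 ≤ c + 1 := by omega
      rw [if_pos h2']
      cases b with
      | none =>
        dsimp only
        rw [ih y (some y) (c + 1) (by omega)]
      | some w =>
        dsimp only
        have hmax : (if w < y then some y else some w) = some (max w y) := by
          by_cases hwy : w < y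
          · rw [if_pos hwy]; congr 1; omega
          · rw [if_neg hwy]; congr 1; omega
        rw [hmax, ih y (some (max w y)) (c + 1) (by omega)]
    · have hne : ¬ ((some p : Option Int) = some y) := by
        intro h; exact hpy (Option.some.injEq p y ▸ h).symm
      simp only [List.zip_cons_cons, List.map_cons, pvLoopB, pvLoopA]
      rw [if_neg (by simpa using fun h => hpy h), if_neg hne, if_neg hne,
        if_neg (by omega : ¬ (2 : Int) ≤ 1)]
      exact congrArg (b :: ·) (ih y b 1 le_rfl)

-- ===== VERDICT (by name: the statement is the Claim_ definition above) =====
theorem denoise_detections_spec : Claim_equal_denoise_detections := by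
  intro sequence _
  unfold Spec_denoise_detections denoise_detections denoise_detections_alt
  cases sequence with
  | nil => rfl
  | cons x rest =>
    have hne : ¬ ((none : Option Int) = some x) := by simp
    simp only [pvLoopA, pvLoopB, if_neg hne, List.drop_succ_cons, List.drop_zero]
    rw [if_neg (by omega : ¬ (2 : Int) ≤ 1)]
    exact congrArg (none :: ·) (pvLoopB_eq_pvLoopA rest x none 1 le_rfl).symm
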